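-- pv_equiv track=rewrite | github.com/ch1kim0n1/CosmoCorral | client/eyecore_mvp/flag_detection/pattern_detector.py | _calculate_overall_severity
-- ===== SOURCE A (Python) =====
-- from typing import Dict, List, Any, Optional
--
-- def _calculate_overall_severity(patterns: List[Dict[str, Any]]) -> str:
--     """Calculate overall severity from detected patterns."""
--     if not patterns:
--         return "low"
--
--     severities = [p.get("severity", "medium") for p in patterns]
--
--     if "critical" in severities:
--         return "critical"
--     elif severities.count("high") >= 2:
--         return "high"
--     elif "high" in severities:
--         return "medium"
--     else:
--         return "low"
-- ===== SOURCE B (Python) =====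
-- def _calculate_overall_severity(patterns):
--     """Calculate overall severity from detected patterns.
--
--     Recursive descent over the list that STOPS at the first 'critical'
--     pattern; the number of 'high' patterns seen so far rides along as an
--     accumulator and is judged only when the end of the list is reached.
--     """
--     def go(ps, highs):
--         if not ps:
--             if highs >= 2:
--                 return "high"
--             if highs == 1:
--                 return "medium"
--             return "low"
--         s = ps[0].get("severity", "medium")
--         if s == "critical":
--             return "critical"
--         return go(ps[1:], highs + (1 if s == "high" else 0))
--     return go(patterns, 0)
-- ===== Notes on version B (the rewrite author's own statement) =====
-- stated objective: alternative
-- what changed: A builds a severities list and makes three separate whole-list scans (membership, count, membership); B is a recursive descent with a high-count accumulator that returns 'critical' immediately at the first critical pattern and only judges the accumulated count at the end of the list.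
import Mathlib
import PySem

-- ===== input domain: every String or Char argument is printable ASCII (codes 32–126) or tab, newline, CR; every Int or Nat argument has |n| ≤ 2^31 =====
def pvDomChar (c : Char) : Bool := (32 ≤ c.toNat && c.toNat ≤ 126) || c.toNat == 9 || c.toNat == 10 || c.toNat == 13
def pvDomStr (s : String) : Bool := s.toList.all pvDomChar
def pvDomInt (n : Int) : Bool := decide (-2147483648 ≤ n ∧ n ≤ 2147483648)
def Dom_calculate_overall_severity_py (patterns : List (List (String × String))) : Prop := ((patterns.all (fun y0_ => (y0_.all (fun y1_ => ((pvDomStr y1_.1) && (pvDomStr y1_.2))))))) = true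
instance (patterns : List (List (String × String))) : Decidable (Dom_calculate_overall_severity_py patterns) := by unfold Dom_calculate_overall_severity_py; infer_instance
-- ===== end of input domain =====

-- B replaces A's severities list and three whole-list scans by a recursive descent with a
-- high-count accumulator that returns at the first 'critical' pattern (objective: alternative).

-- ===== PORT A =====
def calculate_overall_severity_py (patterns : List (List (String × String))) : String :=
  if patterns = [] then "low"
  else
    let severities := patterns.map (fun p => (PySem.Dict.mk p).getD "severity" "medium")
    if "critical" ∈ severities then "critical"
    else if severities.count "high" ≥ 2 then "high"
    else if "high" ∈ severities then "medium"
    else "low"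

-- ===== PORT B =====
def sevGo : List (List (String × String)) → Nat → String
  | [], highs =>
    if highs ≥ 2 then "high"
    else if highs = 1 then "medium"
    else "low"
  | p :: ps, highs =>
    let s := (PySem.Dict.mk p).getD "severity" "medium"
    if s == "critical" then "critical"
    else sevGo ps (highs + (if s == "high" then 1 else 0))

def calculate_overall_severity_py_alt (patterns : List (List (String × String))) : String :=
  sevGo patterns 0

-- ===== PRECONDITION & SPEC =====
def Spec_calculate_overall_severity_py (patterns : List (List (String × String))) (out : String) : Prop := out = calculate_overall_severity_py_alt patterns
instance (patterns : List (List (String × String))) (out : String) : Decidable (Spec_calculate_overall_severity_py patterns out) := by unfold Spec_calculate_overall_severity_py; infer_instance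

-- ===== CLAIM (what is proved, stated in full; the proofs are below) =====
def Claim_equal_calculate_overall_severity_py : Prop := ∀ (patterns : List (List (String × String))), Dom_calculate_overall_severity_py patterns → Spec_calculate_overall_severity_py patterns (calculate_overall_severity_py patterns)

-- ===== LEMMAS AND PROOFS =====

-- characterisation of B's recursion in terms of A's severities list
theorem sevGo_eq (l : List (List (String × String))) (h : Nat) :
    sevGo l h
    = (let sevs := l.map (fun p => (PySem.Dict.mk p).getD "severity" "medium")
       if "critical" ∈ sevs then "critical"
       else if h + sevs.count "high" ≥ 2 then "high"
       else if h + sevs.count "high" ≥ 1 then "medium"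
       else "low") := by
  induction l generalizing h with
  | nil =>
    simp only [sevGo, List.map_nil, List.not_mem_nil, if_false, List.count_nil, Nat.add_zero]
    by_cases h2 : h ≥ 2
    · simp [h2]
    · by_cases h1 : h = 1
      · simp [h1]
      · have : ¬ h ≥ 1 := by omega
        simp [h2, h1, this]
  | cons p ps ih =>
    simp only [sevGo]
    by_cases hc : (PySem.Dict.mk p).getD "severity" "medium" = "critical"
    · simp [hc]
    · rw [if_neg (by simpa using hc), ih]
      have hc' : ¬ ("critical" = (PySem.Dict.mk p).getD "severity" "medium") := fun h => hc h.symm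
      by_cases hh : (PySem.Dict.mk p).getD "severity" "medium" = "high"
      · simp only [List.map_cons, List.mem_cons, List.count_cons, hh, if_pos rfl,
          beq_iff_eq]
        have : ¬ ("critical" = "high") := by decide
        simp only [hh] at hc' ⊢
        simp [hc', Nat.add_assoc, Nat.add_comm 1]
      · simp only [List.map_cons, List.mem_cons, List.count_cons, beq_iff_eq, hh]
        simp [hc']

-- ===== VERDICT (by name: the statement is the Claim_ definition above) =====
theorem calculate_overall_severity_py_spec : Claim_equal_calculate_overall_severity_py := by
  intro patterns _
  unfold Spec_calculate_overall_severity_py calculate_overall_severity_py calculate_overall_severity_py_alt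
  rw [sevGo_eq]
  cases patterns with
  | nil => simp
  | cons p ps =>
    simp only [reduceCtorEq, if_false, Nat.zero_add]
    set sevs := ((p :: ps).map (fun q => (PySem.Dict.mk q).getD "severity" "medium")) with hs
    by_cases hc : "critical" ∈ sevs
    · simp [hc]
    · simp only [hc, if_false]
      by_cases h2 : sevs.count "high" ≥ 2
      · simp [h2]
      · simp only [h2, if_false]
        by_cases hh : "high" ∈ sevs
        · have : sevs.count "high" ≥ 1 := List.count_pos_iff.mpr hh
          simp [hh, this]
        · have : sevs.count "high" = 0 := by simpa [List.count_eq_zero] using hh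
          simp [hh, this]
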